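-- pv_equiv track=rewrite | github.com/miliar/Code_Jam_Webscraper | solutions_python/solutions_year17_round0_nr3/2135.py | solve
-- ===== SOURCE A (Python) =====
-- from math import floor, ceil
--
-- def solve(test):
--     n = test[0]
--     k = test[1]
--     # if k == n:
--     #     return '0 0'
--     # if k > n / 2:
--     #     return '1 0'
--
--     s = [n]
--     ind = 0
--     v = n
--
--     for i in range(k):
--         (l, r) = floor((v - 1) / 2), ceil((v - 1) / 2)
--         s[ind] = r
--         s.insert(ind, l)
--
--         v = max(s)
--         ind = s.index(v)
--
--     var = map(int, [max(r, l), min(r,l)])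
--     return ' '.join(map (str, var))
-- ===== SOURCE B (Python) =====
-- def solve(test):
--     n = test[0]
--     k = test[1]
--     # size m of the segment split at step k: after the first n splits every
--     # segment is empty, so for k > n the split segment has size 0; otherwise
--     # the k-th split happens at binary level d (per = 2**d segments), where the
--     # per segments have sizes f+1 (r of them, split first) and f.
--     if k > n:
--         m = 0
--     else:
--         per = _highbit(k)          # 2**d with 2**d <= k < 2**(d+1)
--         f, r = divmod(n - per + 1, per)
--         m = f + 1 if k - per < r else f
--     return str(m // 2) + ' ' + str((m - 1) // 2)
--
--
-- def _highbit(k):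
--     return 2 * _highbit(k // 2) if k >= 2 else 1
-- ===== Notes on version B (the rewrite author's own statement) =====
-- stated objective: faster
-- what changed: A simulates all k splits on an explicit segment list (a max/index/insert pass per split); B computes the size of the segment split at step k in closed form from the binary level structure and prints its two halves. Pre_ excludes inputs where A raises (fewer than two elements: IndexError; k <= 0: NameError on the unbound l, r) and non-positive n, which is outside the problem's domain of positive segment lengths (A there 'splits' non-positive segments).
-- outside the precondition, e.g. on solve([-3, 2]): A returns '-1 -2', B returns '0 -1'
import Mathlib
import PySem

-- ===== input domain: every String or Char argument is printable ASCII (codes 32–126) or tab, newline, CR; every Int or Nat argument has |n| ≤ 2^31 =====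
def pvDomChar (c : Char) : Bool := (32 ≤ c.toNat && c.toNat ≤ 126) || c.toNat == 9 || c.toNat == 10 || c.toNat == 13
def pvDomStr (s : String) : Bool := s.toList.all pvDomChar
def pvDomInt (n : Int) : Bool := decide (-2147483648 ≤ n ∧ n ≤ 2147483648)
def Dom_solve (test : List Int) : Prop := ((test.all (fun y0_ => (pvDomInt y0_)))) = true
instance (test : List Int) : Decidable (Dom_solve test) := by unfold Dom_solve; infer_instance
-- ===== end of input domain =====

-- B replaces A's O(k^2) split-by-split simulation of the segment list by a closed-form
-- computation of the size of the segment split at step k (O(log k) arithmetic).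

-- ===== PORT A =====
-- loop state of A: the segment list s, and the variables ind, v, l, r
structure StA where
  s : List Int
  ind : Int
  v : Int
  l : Int
  r : Int
deriving Repr, DecidableEq

-- one iteration of A's `for i in range(k)` body.
-- floor((v-1)/2) and ceil((v-1)/2) are computed by Python on floats; exact here because
-- (v-1)/2 has a power-of-two divisor, so ported as exact integer floor/ceil division.
def stepA (st : StA) : StA :=
  let l := PySem.Int.floordiv (st.v - 1) 2
  let r := -(PySem.Int.floordiv (1 - st.v) 2)
  let s1 := PySem.List.pySetD st.s st.ind r        -- s[ind] = r  (ind is always a valid index)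
  let s2 := PySem.List.insert s1 st.ind l          -- s.insert(ind, l)
  let v := (PySem.List.max? s2 (fun x => x)).getD 0    -- v = max(s)  (s never empty)
  let ind := (((PySem.List.index? s2 v).getD 0 : Nat) : Int)   -- ind = s.index(v)
  ⟨s2, ind, v, l, r⟩

def solve (test : List Int) : String :=
  let n := (PySem.List.pyGet? test 0).getD 0   -- first element; IndexError when fewer than two elements, excluded by Pre_solve
  let k := (PySem.List.pyGet? test 1).getD 0   
  -- l, r start as 0,0: Python leaves them undefined (NameError for k <= 0, excluded by Pre_solve)
  let st := (List.range k.toNat).foldl (fun st _ => stepA st) ⟨[n], 0, n, 0, 0⟩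
  PySem.Str.join " " [PySem.Int.toStr (max st.r st.l), PySem.Int.toStr (min st.r st.l)]

-- ===== PORT B =====
-- _highbit(k) = 2**d with 2**d <= k < 2**(d+1)
def highbitB (k : Int) : Int :=
  if h : 2 ≤ k then 2 * highbitB (PySem.Int.floordiv k 2) else 1
termination_by k.toNat
decreasing_by
  rw [PySem.Int.floordiv_eq_ediv_of_pos (by omega)]
  omega

def solve_alt (test : List Int) : String :=
  let n := (PySem.List.pyGet? test 0).getD 0
  let k := (PySem.List.pyGet? test 1).getD 0
  let m :=
    if n < k then 0
    else
      let per := highbitB k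
      let f := PySem.Int.floordiv (n - per + 1) per
      let r := PySem.Int.mod (n - per + 1) per
      if k - per < r then f + 1 else f
  PySem.Int.toStr (PySem.Int.floordiv m 2) ++ " " ++ PySem.Int.toStr (PySem.Int.floordiv (m - 1) 2)

-- ===== PRECONDITION & SPEC =====
-- Pre_solve excludes the inputs where A raises — fewer than two elements (IndexError on the
-- second subscript) and a non-positive second element k (the loop never runs, so `max(r, l)`
-- hits unbound locals l, r: NameError) — and a non-positive first element n, which is outside
-- the problem's domain of positive segment lengths (A there 'splits' non-positive segments).
def Pre_solve (test : List Int) : Prop :=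
  2 ≤ test.length ∧ 1 ≤ test.getD 1 0 ∧ 1 ≤ test.getD 0 0
instance (test : List Int) : Decidable (Pre_solve test) := by unfold Pre_solve; infer_instance

def pvWitness_solve : List Int := [8, 3]

def Spec_solve (test : List Int) (out : String) : Prop := out = solve_alt test
instance (test : List Int) (out : String) : Decidable (Spec_solve test out) := by unfold Spec_solve; infer_instance

-- ===== CLAIM (what is proved, stated in full; the proofs are below) =====
def Claim_equal_solve : Prop := ∀ (test : List Int), Dom_solve test → Pre_solve test → Spec_solve test (solve test)


-- ===== LEMMAS AND PROOFS =====

-- A's state after i iterations of the loop, started on n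
def iterA (n : Int) (i : Nat) : StA := stepA^[i] ⟨[n], 0, n, 0, 0⟩

-- invariant maintained by A's loop: v is the maximum of s and ind its first index
def GoodSt (st : StA) : Prop :=
  st.v ∈ st.s ∧ (∀ x ∈ st.s, x ≤ st.v) ∧
  st.ind = (((PySem.List.index? st.s st.v).getD 0 : Nat) : Int)

-- ----- the level structure of the split process for n >= 1 -----
-- after i splits, with d = log2(i+1), the list holds the 2^d level-d segments (sizes f and
-- f+1, partitioning x = n - 2^d + 1), except that the first j = i+1-2^d of them (largest
-- first) are already replaced by their two halves.
def lvD (i : Nat) : Nat := Nat.log2 (i + 1)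
def lvPer (i : Nat) : Nat := 2 ^ lvD i
def lvJ (i : Nat) : Nat := i + 1 - lvPer i
def lvX (n : Int) (i : Nat) : Int := n - (lvPer i : Int) + 1
def lvF (n : Int) (i : Nat) : Int := PySem.Int.floordiv (lvX n i) (lvPer i)
def lvRI (n : Int) (i : Nat) : Int := PySem.Int.mod (lvX n i) (lvPer i)
def lvRN (n : Int) (i : Nat) : Nat := (lvRI n i).toNat

-- the size of the segment A splits at step i+1 (the maximum after i splits)
def posMax (n : Int) (i : Nat) : Int := if lvJ i < lvRN n i then lvF n i + 1 else lvF n i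

-- generic shape of the multiset of segment sizes: per - j whole level segments (rN of size
-- F+1, largest first, so rN - min j rN of them left) and the halves of the j split ones
def msOf (F : Int) (per rN j : Nat) : Multiset Int :=
  Multiset.replicate (rN - min j rN) (F + 1) + Multiset.replicate ((per - rN) - (j - min j rN)) F +
  Multiset.replicate (min j rN) (F / 2) +
  Multiset.replicate (min j rN) ((F + 1) / 2) +
  Multiset.replicate (j - min j rN) ((F - 1) / 2) +
  Multiset.replicate (j - min j rN) (F / 2)

-- the multiset of segment sizes after i splits (n >= 1, i < n)
def posMS (n : Int) (i : Nat) : Multiset Int := msOf (lvF n i) (lvPer i) (lvRN n i) (lvJ i)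

-- ----- small arithmetic bridges -----
lemma fd2 (a : Int) : PySem.Int.floordiv a 2 = a / 2 :=
  PySem.Int.floordiv_eq_ediv_of_pos (by norm_num)

lemma ceil_pred_half (v : Int) : -(PySem.Int.floordiv (1 - v) 2) = PySem.Int.floordiv v 2 := by
  rw [fd2, fd2]; omega

lemma halves_le (v : Int) : PySem.Int.floordiv (v - 1) 2 ≤ PySem.Int.floordiv v 2 := by
  rw [fd2, fd2]; omega

lemma halves_sum (v : Int) :
    PySem.Int.floordiv (v - 1) 2 + PySem.Int.floordiv v 2 = v - 1 := by
  rw [fd2, fd2]; omega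

lemma foldl_range_iterate (f : StA → StA) (init : StA) (m : Nat) :
    (List.range m).foldl (fun st _ => f st) init = f^[m] init := by
  induction m with
  | zero => rfl
  | succ m ih => rw [List.range_succ, List.foldl_append, ih, Function.iterate_succ_apply']; rfl

-- ----- the generic step lemma -----
lemma stepA_spec (st : StA) (h : GoodSt st) :
    st.v ::ₘ ((stepA st).s : Multiset Int) =
      PySem.Int.floordiv (st.v - 1) 2 ::ₘ (-(PySem.Int.floordiv (1 - st.v) 2)) ::ₘ (st.s : Multiset Int) ∧
    (stepA st).l = PySem.Int.floordiv (st.v - 1) 2 ∧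
    (stepA st).r = -(PySem.Int.floordiv (1 - st.v) 2) ∧
    GoodSt (stepA st) := by
  obtain ⟨hmem, hmax, hind⟩ := h
  set l := PySem.Int.floordiv (st.v - 1) 2 with hl
  set r := -(PySem.Int.floordiv (1 - st.v) 2) with hr
  have hsome : (PySem.List.index? st.s st.v).isSome := (PySem.List.index?_isSome_iff _ _).mpr hmem
  obtain ⟨idx, hidx⟩ : ∃ idx, PySem.List.index? st.s st.v = some idx :=
    Option.isSome_iff_exists.mp hsome
  obtain ⟨pre, suf, hdecomp, hlen, -⟩ := (PySem.List.index?_eq_some_iff _ _ _).mp hidx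
  have hind' : st.ind = ((idx : Nat) : Int) := by rw [hind, hidx]; rfl
  have hs1 : PySem.List.pySetD st.s st.ind r = pre ++ r :: suf := by
    rw [hind', PySem.List.pySetD_natCast, hdecomp, ← hlen]
    rw [List.set_append_right _ _ (le_refl pre.length)]
    simp
  have hs2 : PySem.List.insert (pre ++ r :: suf) st.ind l = pre ++ l :: r :: suf := by
    rw [hind']
    rw [PySem.List.insert_natCast _ _ _ (by simp [← hlen])]
    rw [← hlen]
    simp [List.take_left', List.drop_left']
  have hs2' : (stepA st).s = pre ++ l :: r :: suf := by
    show PySem.List.insert (PySem.List.pySetD st.s st.ind _) st.ind _ = _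
    rw [← hr, ← hl, hs1, hs2]
  have hs2ne : (stepA st).s ≠ [] := by rw [hs2']; simp
  have hvmax : ∃ m, PySem.List.max? (stepA st).s (fun x => x) = some m := by
    rcases hm : PySem.List.max? (stepA st).s (fun x => x) with _ | m
    · exact absurd ((PySem.List.max?_eq_none_iff _ _).mp hm) hs2ne
    · exact ⟨m, rfl⟩
  obtain ⟨m, hm⟩ := hvmax
  have hv' : (stepA st).v = m := by
    show (PySem.List.max? (stepA st).s (fun x => x)).getD 0 = m
    rw [hm]; rfl
  constructor
  · rw [hs2', hdecomp]
    simp only [← Multiset.cons_coe, ← Multiset.coe_add, ← Multiset.singleton_add]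
    abel
  refine ⟨rfl, rfl, ?_, ?_, rfl⟩
  · rw [hv']
    exact PySem.List.max?_mem hm
  · intro x hx
    rw [hv']
    exact PySem.List.max?_isMax hm x hx

-- ----- level arithmetic -----
lemma lv_basic (i : Nat) : 0 < lvPer i ∧ lvPer i ≤ i + 1 ∧ i + 1 < 2 * lvPer i := by
  refine ⟨Nat.two_pow_pos _, Nat.log2_self_le (by omega), ?_⟩
  have := Nat.lt_log2_self (n := i + 1)
  unfold lvPer lvD
  rw [pow_succ] at this
  omega

lemma lv_div (n : Int) (i : Nat) :
    lvX n i = lvF n i * lvPer i + lvRI n i ∧ 0 ≤ lvRI n i ∧ lvRI n i < lvPer i := by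
  have hp : (0:Int) < (lvPer i : Int) := by exact_mod_cast (lv_basic i).1
  refine ⟨?_, PySem.Int.mod_nonneg _ hp, PySem.Int.mod_lt _ hp⟩
  have := PySem.Int.floordiv_mul_add_mod (lvX n i) (lvPer i)
  unfold lvF lvRI
  linarith [this]

-- standing facts at level i for 1 ≤ n, i < n
lemma lv_pos_facts (n : Int) (i : Nat) (h1 : 1 ≤ n) (hi : i < n.toNat) :
    0 ≤ lvF n i ∧ ((lvRN n i : Int) = lvRI n i) ∧ lvRN n i < lvPer i ∧
      lvJ i < lvPer i ∧ lvJ i + 1 = i + 2 - lvPer i ∧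
      (lvRN n i ≤ lvJ i → 1 ≤ lvF n i) := by
  obtain ⟨hp, hple, hplt⟩ := lv_basic i
  obtain ⟨hdiv, hr0, hrlt⟩ := lv_div n i
  have hpI : (0:Int) < (lvPer i : Int) := by exact_mod_cast hp
  have hnI : (i:Int) + 1 ≤ n := by omega
  have hxI : lvX n i = n - (lvPer i : Int) + 1 := rfl
  have hpleI : ((lvPer i : Nat) : Int) ≤ (i:Int) + 1 := by exact_mod_cast hple
  have hx1 : 1 ≤ lvX n i := by omega
  have hf0 : 0 ≤ lvF n i := by
    by_contra hneg
    push_neg at hneg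
    have : lvF n i ≤ -1 := by omega
    nlinarith
  have hrn : (lvRN n i : Int) = lvRI n i := by unfold lvRN; omega
  have hrnlt : lvRN n i < lvPer i := by omega
  have hjlt : lvJ i < lvPer i := by unfold lvJ; omega
  refine ⟨hf0, hrn, hrnlt, hjlt, by unfold lvJ; omega, ?_⟩
  intro hjr
  by_contra hneg
  push_neg at hneg
  have hf0' : lvF n i = 0 := by omega
  rw [hf0'] at hdiv
  have hjI : ((lvJ i : Nat) : Int) = (i:Int) + 1 - (lvPer i : Int) := by
    unfold lvJ; omega
  omega

lemma posMax_isMax (n : Int) (i : Nat) (h1 : 1 ≤ n) (hi : i < n.toNat) :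
    posMax n i ∈ posMS n i ∧ ∀ x ∈ posMS n i, x ≤ posMax n i := by
  obtain ⟨hf0, hrn, hrnlt, hjlt, -, hfge1⟩ := lv_pos_facts n i h1 hi
  unfold posMS msOf posMax
  simp only [Multiset.mem_add, Multiset.mem_replicate]
  by_cases hjr : lvJ i < lvRN n i
  · simp only [if_pos hjr]
    constructor
    · left; left; left; left; left
      exact ⟨by omega, trivial⟩
    · intro x hx
      rcases hx with ((((h | h) | h) | h) | h) | h <;> obtain ⟨-, rfl⟩ := h <;> omega
  · simp only [if_neg hjr]
    have hf1 : 1 ≤ lvF n i := hfge1 (by omega)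
    constructor
    · left; left; left; left; right
      exact ⟨by omega, trivial⟩
    · intro x hx
      rcases hx with ((((h | h) | h) | h) | h) | h <;> obtain ⟨hc, rfl⟩ := h <;> omega

lemma lvD_succ_within (i : Nat) (h : i + 2 < 2 * lvPer i) : lvD (i + 1) = lvD i := by
  obtain ⟨hp, hple, hplt⟩ := lv_basic i
  unfold lvD
  rw [Nat.log2_eq_log_two]
  refine Nat.log_eq_of_pow_le_of_lt_pow ?_ ?_
  · show lvPer i ≤ i + 2
    omega
  · show i + 2 < 2 ^ (lvD i + 1)
    rw [pow_succ]
    unfold lvPer at h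
    omega

lemma lvD_succ_complete (i : Nat) (h : i + 2 = 2 * lvPer i) :
    lvPer (i + 1) = 2 * lvPer i ∧ lvJ (i + 1) = 0 := by
  obtain ⟨hp, hple, hplt⟩ := lv_basic i
  have hd : lvD (i + 1) = lvD i + 1 := by
    unfold lvD
    rw [Nat.log2_eq_log_two]
    refine Nat.log_eq_of_pow_le_of_lt_pow ?_ ?_
    · show 2 ^ (lvD i + 1) ≤ i + 2
      rw [pow_succ]
      unfold lvPer at h
      omega
    · show i + 2 < 2 ^ (lvD i + 1 + 1)
      rw [pow_succ, pow_succ]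
      unfold lvPer at h
      omega
  have hper : lvPer (i + 1) = 2 * lvPer i := by
    unfold lvPer
    rw [hd, pow_succ]
    ring
  exact ⟨hper, by unfold lvJ; omega⟩

-- ----- the four multiset step identities, on the abstract shape -----
lemma msOf_zero (F : Int) (per rN : Nat) :
    msOf F per rN 0 = Multiset.replicate rN (F + 1) + Multiset.replicate (per - rN) F := by
  simp [msOf]

lemma msOf_ge (F : Int) (per rN j : Nat) (h : rN ≤ j) :
    msOf F per rN j = Multiset.replicate ((per - rN) - (j - rN)) F +
      Multiset.replicate rN (F / 2) + Multiset.replicate rN ((F + 1) / 2) +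
      Multiset.replicate (j - rN) ((F - 1) / 2) + Multiset.replicate (j - rN) (F / 2) := by
  simp [msOf, Nat.min_eq_right h]

lemma stepWithinC (F : Int) (per rN j : Nat) (hF : 0 ≤ F) (hr : j < rN) (hj : j + 1 < per) (hrp : rN ≤ per) :
    (F + 1) ::ₘ msOf F per rN (j+1) = F / 2 ::ₘ (F + 1) / 2 ::ₘ msOf F per rN j := by
  unfold msOf
  apply Multiset.ext.mpr
  intro y
  simp only [Multiset.count_cons, Multiset.count_add, Multiset.count_replicate]
  split_ifs <;> omega

lemma stepWithinF (F : Int) (per rN j : Nat) (hF : 1 ≤ F) (hr : rN ≤ j) (hj : j + 1 < per) (hrp : rN < per) :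
    F ::ₘ msOf F per rN (j+1) = (F - 1) / 2 ::ₘ F / 2 ::ₘ msOf F per rN j := by
  unfold msOf
  apply Multiset.ext.mpr
  intro y
  simp only [Multiset.count_cons, Multiset.count_add, Multiset.count_replicate]
  split_ifs <;> omega

lemma stepCompleteEven (F g : Int) (per rN : Nat) (hg : F = g + g) (hF : 1 ≤ F) (hp : 1 ≤ per) (hrp : rN < per) :
    F ::ₘ msOf (g - 1) (2 * per) (per + rN) 0 = (F - 1) / 2 ::ₘ F / 2 ::ₘ msOf F per rN (per - 1) := by
  rw [msOf_zero, msOf_ge F per rN (per - 1) (by omega), show g - 1 + 1 = g from by ring]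
  apply Multiset.ext.mpr
  intro y
  simp only [Multiset.count_cons, Multiset.count_add, Multiset.count_replicate]
  split_ifs <;> omega

lemma stepCompleteOdd (F g : Int) (per rN : Nat) (hg : F = g + g + 1) (hF : 1 ≤ F) (hp : 1 ≤ per) (hrp : rN < per) :
    F ::ₘ msOf g (2 * per) rN 0 = (F - 1) / 2 ::ₘ F / 2 ::ₘ msOf F per rN (per - 1) := by
  rw [msOf_zero, msOf_ge F per rN (per - 1) (by omega)]
  apply Multiset.ext.mpr
  intro y
  simp only [Multiset.count_cons, Multiset.count_add, Multiset.count_replicate]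
  split_ifs <;> omega

-- ----- splitting the maximum advances the level structure by one step -----
lemma posMS_step (n : Int) (i : Nat) (h1 : 1 ≤ n) (hi : i + 1 < n.toNat) :
    posMax n i ::ₘ posMS n (i + 1) =
      PySem.Int.floordiv (posMax n i - 1) 2 ::ₘ
        (-(PySem.Int.floordiv (1 - posMax n i) 2)) ::ₘ posMS n i := by
  rw [ceil_pred_half]
  obtain ⟨hp, hple, hplt⟩ := lv_basic i
  obtain ⟨hdiv, hr0, hrlt⟩ := lv_div n i
  obtain ⟨hf0, hrn, hrnlt, hjlt, hjsucc, hfge1⟩ := lv_pos_facts n i h1 (by omega)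
  rcases Nat.lt_or_ge (i + 2) (2 * lvPer i) with hcase | hcase
  · -- same level, j increments
    have hd : lvD (i + 1) = lvD i := lvD_succ_within i hcase
    have hper : lvPer (i + 1) = lvPer i := by unfold lvPer; rw [hd]
    have hx : lvX n (i + 1) = lvX n i := by unfold lvX; rw [hper]
    have hf : lvF n (i + 1) = lvF n i := by unfold lvF; rw [hx, hper]
    have hri : lvRI n (i + 1) = lvRI n i := by unfold lvRI; rw [hx, hper]
    have hrN : lvRN n (i + 1) = lvRN n i := by unfold lvRN; rw [hri]
    have hj : lvJ (i + 1) = lvJ i + 1 := by unfold lvJ at *; omega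
    unfold posMS posMax
    rw [hf, hrN, hj, hper]
    by_cases hjr : lvJ i < lvRN n i
    · rw [if_pos hjr, fd2, fd2, show lvF n i + 1 - 1 = lvF n i from by ring]
      exact stepWithinC (lvF n i) (lvPer i) (lvRN n i) (lvJ i) hf0 hjr (by omega) (by omega)
    · rw [if_neg hjr, fd2, fd2]
      exact stepWithinF (lvF n i) (lvPer i) (lvRN n i) (lvJ i) (hfge1 (by omega)) (by omega) (by omega) hrnlt
  · -- level completes
    have hcase' : i + 2 = 2 * lvPer i := by omega
    obtain ⟨hper, hj0⟩ := lvD_succ_complete i hcase'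
    have hj : lvJ i = lvPer i - 1 := by unfold lvJ; omega
    have hjge : lvRN n i ≤ lvJ i := by omega
    have hf1 : 1 ≤ lvF n i := hfge1 hjge
    have hx : lvX n (i + 1) = lvX n i - lvPer i := by
      unfold lvX; rw [hper]; push_cast; ring
    have hpI : (0:Int) < ((2 * lvPer i : Nat) : Int) := by positivity
    have huniq := fun (q r : Int) => Int.ediv_emod_unique (a := lvX n (i+1)) (b := ((2 * lvPer i : Nat) : Int)) (q := q) (r := r) hpI
    have hfd' : lvF n (i+1) = lvX n (i+1) / ((2 * lvPer i : Nat) : Int) := by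
      unfold lvF; rw [hper, PySem.Int.floordiv_eq_ediv_of_pos hpI]
    have hrd' : lvRI n (i+1) = lvX n (i+1) % ((2 * lvPer i : Nat) : Int) := by
      unfold lvRI; rw [hper, PySem.Int.mod_eq_emod_of_pos hpI]
    rcases Int.even_or_odd (lvF n i) with ⟨g, hg⟩ | ⟨g, hg⟩
    · -- f = 2g : f' = g - 1, rI' = per + rI
      have key : lvX n (i+1) / ((2 * lvPer i : Nat) : Int) = g - 1 ∧
          lvX n (i+1) % ((2 * lvPer i : Nat) : Int) = (lvPer i : Int) + lvRI n i := by
        apply (huniq (g-1) ((lvPer i : Int) + lvRI n i)).mpr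
        refine ⟨?_, by push_cast; omega, by push_cast; omega⟩
        rw [hx, hdiv, hg]
        push_cast
        ring
      have hf' : lvF n (i+1) = g - 1 := by rw [hfd', key.1]
      have hri' : lvRI n (i+1) = (lvPer i : Int) + lvRI n i := by rw [hrd', key.2]
      have hrN' : lvRN n (i+1) = lvPer i + lvRN n i := by unfold lvRN at *; omega
      unfold posMS posMax
      rw [hf', hrN', hj0, hper, hj, if_neg (show ¬ (lvPer i - 1 < lvRN n i) by omega), fd2, fd2]
      exact stepCompleteEven (lvF n i) g (lvPer i) (lvRN n i) hg hf1 (by omega) hrnlt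
    · -- f = 2g+1 : f' = g, rI' = rI
      have key : lvX n (i+1) / ((2 * lvPer i : Nat) : Int) = g ∧
          lvX n (i+1) % ((2 * lvPer i : Nat) : Int) = lvRI n i := by
        apply (huniq g (lvRI n i)).mpr
        refine ⟨?_, by omega, by push_cast; omega⟩
        rw [hx, hdiv, hg]
        push_cast
        ring
      have hf' : lvF n (i+1) = g := by rw [hfd', key.1]
      have hri' : lvRI n (i+1) = lvRI n i := by rw [hrd', key.2]
      have hrN' : lvRN n (i+1) = lvRN n i := by unfold lvRN at *; omega
      unfold posMS posMax
      rw [hf', hrN', hj0, hper, hj, if_neg (show ¬ (lvPer i - 1 < lvRN n i) by omega), fd2, fd2]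
      exact stepCompleteOdd (lvF n i) g (lvPer i) (lvRN n i) (by omega) hf1 (by omega) hrnlt

-- ----- B's helper computes the level quantity -----
lemma log2_step (n : Nat) (h : 2 ≤ n) : Nat.log2 n = Nat.log2 (n / 2) + 1 := by
  rw [Nat.log2_eq_log_two, Nat.log2_eq_log_two, Nat.log_div_base]
  have := Nat.log_pos (b := 2) (by norm_num) h
  omega

lemma highbitB_eq (k : Int) (h : 1 ≤ k) : highbitB k = ((2 ^ Nat.log2 k.toNat : Nat) : Int) := by
  induction hk : k.toNat using Nat.strong_induction_on generalizing k with
  | _ m ih =>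
    subst hk
    rw [highbitB]
    split
    · next h2 =>
        have hfd : PySem.Int.floordiv k 2 = k / 2 := PySem.Int.floordiv_eq_ediv_of_pos (by norm_num)
        have h1' : 1 ≤ k / 2 := by omega
        have hlt : (k / 2).toNat < k.toNat := by omega
        rw [hfd, ih _ hlt _ h1' rfl]
        have htn : (k / 2).toNat = k.toNat / 2 := by omega
        rw [htn]
        conv_rhs => rw [log2_step k.toNat (by omega)]
        push_cast [pow_succ]
        ring
    · next h2 =>
        have h1 : k.toNat = 1 := by omega
        rw [h1]
        decide

-- ----- the loop invariants -----
lemma iterA_zero (n : Int) : iterA n 0 = ⟨[n], 0, n, 0, 0⟩ := rfl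

lemma init_good (n : Int) : GoodSt (⟨[n], 0, n, 0, 0⟩ : StA) := by
  refine ⟨by simp, by intro x hx; simp at hx; simp [hx], ?_⟩
  show (0:Int) = _
  rw [show PySem.List.index? [n] n = some 0 from PySem.List.index?_cons_self _ _]
  rfl

lemma lv_zero (n : Int) : lvJ 0 = 0 ∧ lvPer 0 = 1 ∧ lvF n 0 = n ∧ lvRN n 0 = 0 := by
  have h0 : lvPer 0 = 1 := by decide
  have hx : lvX n 0 = n := by unfold lvX; rw [h0]; push_cast; ring
  have hf : lvF n 0 = n := by
    unfold lvF; rw [hx, h0]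
    rw [PySem.Int.floordiv_eq_ediv_of_pos (by norm_num)]
    simp
  have hr : lvRI n 0 = 0 := by
    have h1' := (lv_div n 0).2.1
    have h2' := (lv_div n 0).2.2
    rw [h0] at h2'
    omega
  exact ⟨by decide, h0, hf, by unfold lvRN; rw [hr]; rfl⟩

lemma iterA_succ (n : Int) (i : Nat) : iterA n (i + 1) = stepA (iterA n i) := by
  unfold iterA
  rw [Function.iterate_succ_apply']

lemma posInv (n : Int) (h1 : 1 ≤ n) :
    ∀ i, i < n.toNat →
      GoodSt (iterA n i) ∧ ((iterA n i).s : Multiset Int) = posMS n i ∧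
        (iterA n i).v = posMax n i := by
  intro i
  induction i with
  | zero =>
      intro hi
      obtain ⟨hj0, hper0, hf0', hrN0⟩ := lv_zero n
      refine ⟨by rw [iterA_zero]; exact init_good n, ?_, ?_⟩
      · rw [iterA_zero]
        show (([n] : List Int) : Multiset Int) = posMS n 0
        unfold posMS
        rw [hj0, msOf_zero, hf0', hrN0, hper0]
        simp
      · rw [iterA_zero]
        show n = posMax n 0
        unfold posMax
        rw [hj0, hrN0, hf0']
        simp
  | succ i ih =>
      intro hi
      obtain ⟨hg, hs, hv⟩ := ih (by omega)
      obtain ⟨hmul, -, -, hg'⟩ := stepA_spec (iterA n i) hg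
      rw [← iterA_succ] at hmul hg'
      rw [hs, hv] at hmul
      have hstep := posMS_step n i h1 hi
      have hs' : ((iterA n (i+1)).s : Multiset Int) = posMS n (i + 1) := by
        have : posMax n i ::ₘ ((iterA n (i+1)).s : Multiset Int) = posMax n i ::ₘ posMS n (i + 1) := by
          rw [hmul, hstep]
        exact (Multiset.cons_inj_right _).mp this
      refine ⟨hg', hs', ?_⟩
      obtain ⟨hmx_mem, hmx_max⟩ := posMax_isMax n (i+1) h1 hi
      obtain ⟨hvmem, hvmax, -⟩ := hg'
      apply le_antisymm
      · apply hmx_max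
        rw [← hs']
        exact_mod_cast hvmem
      · apply hvmax
        have : posMax n (i+1) ∈ ((iterA n (i+1)).s : Multiset Int) := by rw [hs']; exact hmx_mem
        exact_mod_cast this

lemma sumInv (n : Int) (h1 : 1 ≤ n) :
    ∀ i, i ≤ n.toNat →
      GoodSt (iterA n i) ∧ (∀ x ∈ (iterA n i).s, 0 ≤ x) ∧ ((iterA n i).s).sum = n - i := by
  intro i
  induction i with
  | zero =>
      intro hi
      rw [iterA_zero]
      refine ⟨init_good n, by intro x hx; simp at hx; omega, by simp⟩
  | succ i ih =>
      intro hi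
      obtain ⟨hg, hpos, hsum⟩ := ih (by omega)
      obtain ⟨hmul, -, -, hg'⟩ := stepA_spec (iterA n i) hg
      rw [← iterA_succ] at hmul hg'
      set v := (iterA n i).v with hvdef
      have hv1 : 1 ≤ v := by
        by_contra hneg
        push_neg at hneg
        have hall : ∀ x ∈ (iterA n i).s, x ≤ 0 := by
          intro x hx
          have := hg.2.1 x hx
          omega
        have : ((iterA n i).s).sum ≤ 0 := by
          have := List.sum_le_sum (l := (iterA n i).s) (f := id) (g := fun _ => (0:Int)) (by simpa using hall)
          simpa using this
        omega
      have hsum' : ((iterA n (i+1)).s).sum = n - (i + 1) := by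
        have := congrArg Multiset.sum hmul
        simp only [Multiset.sum_cons, Multiset.sum_coe] at this
        have hlr := halves_sum v
        rw [ceil_pred_half] at this
        omega
      refine ⟨hg', ?_, by exact_mod_cast hsum'⟩
      intro x hx
      have hx' : (x : Int) ∈ (PySem.Int.floordiv (v - 1) 2 ::ₘ (-(PySem.Int.floordiv (1 - v) 2)) ::ₘ ((iterA n i).s : Multiset Int)) := by
        rw [← hmul]
        exact Multiset.mem_cons_of_mem (by exact_mod_cast hx)
      rcases Multiset.mem_cons.mp hx' with h | h'
      · rw [h, fd2]; omega
      rcases Multiset.mem_cons.mp h' with h | h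
      · rw [h, ceil_pred_half, fd2]; omega
      · exact hpos x (by exact_mod_cast h)

lemma zeroInv (n : Int) (h1 : 1 ≤ n) :
    ∀ i, n.toNat ≤ i →
      GoodSt (iterA n i) ∧ (0 ∈ (iterA n i).s) ∧ (∀ x ∈ (iterA n i).s, x ≤ 0) ∧
        (iterA n i).v = 0 := by
  have base : GoodSt (iterA n n.toNat) ∧ (0 ∈ (iterA n n.toNat).s) ∧
      (∀ x ∈ (iterA n n.toNat).s, x ≤ 0) := by
    obtain ⟨hg, hpos, hsum⟩ := sumInv n h1 n.toNat (le_refl _)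
    have hall0 : ∀ x ∈ (iterA n n.toNat).s, x = 0 := by
      intro x hx
      exact List.all_zero_of_le_zero_le_of_sum_eq_zero hpos (by omega) hx
    refine ⟨hg, ?_, by intro x hx; rw [hall0 x hx]⟩
    have := hg.1
    have h0 : (iterA n n.toNat).v = 0 := hall0 _ this
    rw [← h0]
    exact this
  have main : ∀ j, GoodSt (iterA n (n.toNat + j)) ∧ (0 ∈ (iterA n (n.toNat + j)).s) ∧
      (∀ x ∈ (iterA n (n.toNat + j)).s, x ≤ 0) := by
    intro j
    induction j with
    | zero => exact base
    | succ j ih =>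
        obtain ⟨hg, h0mem, hle⟩ := ih
        have hv0 : (iterA n (n.toNat + j)).v = 0 :=
          le_antisymm (hle _ hg.1) (hg.2.1 0 h0mem)
        obtain ⟨hmul, -, -, hg'⟩ := stepA_spec _ hg
        rw [show n.toNat + (j+1) = (n.toNat + j) + 1 from rfl, iterA_succ]
        have hl0 : PySem.Int.floordiv ((iterA n (n.toNat + j)).v - 1) 2 = -1 := by
          rw [hv0, fd2]; decide
        have hr0 : (-(PySem.Int.floordiv (1 - (iterA n (n.toNat + j)).v) 2)) = 0 := by
          rw [hv0, ceil_pred_half, fd2]; decide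
        rw [hl0, hr0, hv0] at hmul
        refine ⟨hg', ?_, ?_⟩
        · have hc0 : 0 < List.count (0:Int) (iterA n (n.toNat + j)).s :=
            List.count_pos_iff.mpr h0mem
          have hcnt := congrArg (Multiset.count 0) hmul
          simp at hcnt
          have hpos' : 0 < List.count (0:Int) (stepA (iterA n (n.toNat + j))).s := by
            omega
          exact List.count_pos_iff.mp hpos'
        · intro x hx
          have hx' : (x : Int) ∈ ((-1 : Int) ::ₘ (0 : Int) ::ₘ (((iterA n (n.toNat + j)).s : List Int) : Multiset Int)) := by
            rw [← hmul]
            exact Multiset.mem_cons_of_mem (by exact_mod_cast hx)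
          rcases Multiset.mem_cons.mp hx' with h | h'
          · omega
          rcases Multiset.mem_cons.mp h' with h | h
          · omega
          · exact hle x (by exact_mod_cast h)
  intro i hi
  obtain ⟨j, rfl⟩ : ∃ j, i = n.toNat + j := ⟨i - n.toNat, by omega⟩
  obtain ⟨hg, h0mem, hle⟩ := main j
  exact ⟨hg, h0mem, hle, le_antisymm (hle _ hg.1) (hg.2.1 0 h0mem)⟩

-- ----- final glue -----
lemma join_two (a b : String) : PySem.Str.join " " [a, b] = a ++ " " ++ b := by
  apply String.toList_inj.mp
  rw [PySem.Str.toList_join]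
  simp only [List.map_cons, List.map_nil, PySem.Chars.join_cons_cons,
    PySem.Chars.join_singleton, String.toList_append]

-- the value B prints the two halves of equals the maximum after k-1 of A's splits
lemma alt_meets_v (a b : Int) (ha : 1 ≤ a) (hb : 1 ≤ b) :
    (if a < b then 0
     else
      (if b - highbitB b < PySem.Int.mod (a - highbitB b + 1) (highbitB b)
       then PySem.Int.floordiv (a - highbitB b + 1) (highbitB b) + 1
       else PySem.Int.floordiv (a - highbitB b + 1) (highbitB b))) = (iterA a (b.toNat - 1)).v := by
  by_cases hab : a < b
  · -- k > n : the maximum is 0 from step n on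
    rw [if_pos hab]
    exact ((zeroInv a ha (b.toNat - 1) (by omega)).2.2.2).symm
  · -- k ≤ n : the level formula
    rw [if_neg hab]
    have hi : b.toNat - 1 < a.toNat := by omega
    have hv := (posInv a ha (b.toNat - 1) hi).2.2
    rw [hv]
    set i := b.toNat - 1 with hidef
    have hi1 : i + 1 = b.toNat := by omega
    have hdd : lvD i = Nat.log2 b.toNat := by unfold lvD; rw [hi1]
    have hper : highbitB b = ((lvPer i : Nat) : Int) := by
      rw [highbitB_eq b hb]
      unfold lvPer
      rw [hdd]
    have hxx : a - highbitB b + 1 = lvX a i := by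
      rw [hper]; unfold lvX; ring
    obtain ⟨hdiv, hr0, hrlt⟩ := lv_div a i
    obtain ⟨hf0, hrn, hrnlt, hjlt, -, -⟩ := lv_pos_facts a i ha hi
    have hff : PySem.Int.floordiv (a - highbitB b + 1) (highbitB b) = lvF a i := by
      rw [hxx, hper]; rfl
    have hrr : PySem.Int.mod (a - highbitB b + 1) (highbitB b) = lvRI a i := by
      rw [hxx, hper]; rfl
    rw [hff, hrr]
    unfold posMax
    have hple : lvPer i ≤ i + 1 := (lv_basic i).2.1
    have hcond : (b - highbitB b < lvRI a i) ↔ (lvJ i < lvRN a i) := by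
      rw [hper]
      unfold lvJ
      omega
    rw [if_congr hcond rfl rfl]

lemma main_eq (test : List Int) (hpre : Pre_solve test) : solve test = solve_alt test := by
  obtain ⟨hlen, hk1, hn1⟩ := hpre
  match test with
  | a :: b :: t =>
    have hb : 1 ≤ b := by simpa [List.getD] using hk1
    have ha : 1 ≤ a := by simpa [List.getD] using hn1
    have hn : PySem.List.pyGet? (a :: b :: t) 0 = some a := by
      simp [PySem.List.pyGet?, PySem.List.pyIdx?]
      rw [if_pos (by positivity)]
      simp
    have hk : PySem.List.pyGet? (a :: b :: t) 1 = some b := by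
      simp [PySem.List.pyGet?, PySem.List.pyIdx?]
    set v := (iterA a (b.toNat - 1)).v with hvdef
    have hbt : b.toNat = (b.toNat - 1) + 1 := by omega
    have hsolve : solve (a :: b :: t) =
        PySem.Str.join " " [PySem.Int.toStr (PySem.Int.floordiv v 2),
          PySem.Int.toStr (PySem.Int.floordiv (v - 1) 2)] := by
      unfold solve
      rw [hn, hk]
      simp only [Option.getD_some]
      rw [foldl_range_iterate, hbt, Function.iterate_succ_apply']
      have hstl : (stepA (stepA^[b.toNat - 1] ⟨[a], 0, a, 0, 0⟩)).l
          = PySem.Int.floordiv (v - 1) 2 := rfl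
      have hstr : (stepA (stepA^[b.toNat - 1] ⟨[a], 0, a, 0, 0⟩)).r
          = -(PySem.Int.floordiv (1 - v) 2) := rfl
      rw [hstl, hstr, ceil_pred_half]
      rw [max_eq_left (halves_le v), min_eq_right (halves_le v)]
    rw [hsolve, join_two]
    unfold solve_alt
    rw [hn, hk]
    simp only [Option.getD_some]
    rw [alt_meets_v a b ha hb]

-- ===== VERDICT (by name: the statement is the Claim_ definition above) =====
theorem solve_spec : Claim_equal_solve := by
  intro test _ hpre
  unfold Spec_solve
  exact main_eq test hpre
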